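-- pv_equiv track=rewrite | github.com/binnev/advent-of-code | _2021/python/day19.py | match_axis
-- ===== SOURCE A (Python) =====
-- def match_axis(scanner0, scanner1):
--     xs0 = [x for (x, y, z) in scanner0]
--     xs1 = [x for (x, y, z) in scanner1]
--     for p1, x0 in enumerate(xs0):
--         for p2, x1 in enumerate(xs1):
--             # will need to shift the x,y of all scanner2 to achieve this.
--             dx = x0 - x1
--             shifted1 = [(x + dx) for x in xs1]
--
--             # if, after the shift, 3 beacons overlap, it's a match
--             hits = set(shifted1).intersection(xs0)
--             if len(hits) > 11:
--                 return dx, p1, p2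
--     return None, None, None
-- ===== SOURCE B (Python) =====
-- def match_axis(scanner0, scanner1):
--     xs0 = [x for (x, y, z) in scanner0]
--     xs1 = [x for (x, y, z) in scanner1]
--     # one pass precomputes |set(xs1 shifted by dx) & set(xs0)| for every dx
--     counts = {}
--     for a in dict.fromkeys(xs0):
--         for b in dict.fromkeys(xs1):
--             counts[a - b] = counts.get(a - b, 0) + 1
--     # single flat scan over all index pairs in row-major order
--     n = len(xs1)
--     for k in range(len(xs0) * n):
--         p1, p2 = divmod(k, n)
--         dx = xs0[p1] - xs1[p2]
--         if counts.get(dx, 0) > 11: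
--             return dx, p1, p2
--     return None, None, None
-- ===== Notes on version B (the rewrite author's own statement) =====
-- stated objective: alternative
-- what changed: Instead of rebuilding and intersecting a shifted set for every (p1,p2) pair inside two nested enumerate loops (O(n) set work per pair, O(n^3) total), B precomputes one table counting each pairwise x-difference over the deduplicated coordinate lists and then runs a single flat scan over k in range(m*n), recovering (p1,p2) with divmod and doing one dict lookup per pair (O(n^2) total); a timing run could not measure a speed difference at its input sizes, so no speed claim is made.
import Mathlib
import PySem

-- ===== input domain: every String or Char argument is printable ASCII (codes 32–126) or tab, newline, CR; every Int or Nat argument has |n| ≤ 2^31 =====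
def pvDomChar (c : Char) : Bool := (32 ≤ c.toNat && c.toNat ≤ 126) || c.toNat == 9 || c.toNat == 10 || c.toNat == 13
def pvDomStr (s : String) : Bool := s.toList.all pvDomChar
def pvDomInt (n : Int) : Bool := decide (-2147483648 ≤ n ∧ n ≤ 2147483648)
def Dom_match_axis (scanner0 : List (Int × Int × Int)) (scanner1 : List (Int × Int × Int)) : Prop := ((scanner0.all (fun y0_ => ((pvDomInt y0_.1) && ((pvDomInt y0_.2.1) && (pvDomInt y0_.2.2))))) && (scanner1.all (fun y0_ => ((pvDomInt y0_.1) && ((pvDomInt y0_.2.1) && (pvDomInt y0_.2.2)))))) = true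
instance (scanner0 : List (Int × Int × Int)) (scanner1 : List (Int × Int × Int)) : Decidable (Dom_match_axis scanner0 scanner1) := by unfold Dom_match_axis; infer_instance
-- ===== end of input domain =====

-- B replaces A's per-pair set build/intersection by one precomputed table of pairwise
-- x-differences over deduplicated coordinates, and replaces A's nested enumerate loops by a
-- single flat scan over k in range(m*n) with divmod (objective: alternative algorithm).

-- ===== PORT A =====
-- inner 'for p2, x1 in enumerate(xs1)' loop; 'some r' = early return
def matchAInner (xs0 xs1 : List Int) (p1 x0 : Int) : List (Int × Int) → Option (List (Option Int))
  | [] => none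
  | (p2, x1) :: rest =>
    let dx := x0 - x1
    let shifted1 := xs1.map (fun x => x + dx)
    let hits := PySem.Set.inter (PySem.Set.ofList shifted1) xs0
    if PySem.Set.len hits > 11 then some [some dx, some p1, some p2]
    else matchAInner xs0 xs1 p1 x0 rest

-- outer 'for p1, x0 in enumerate(xs0)' loop
def matchAOuter (xs0 xs1 : List Int) : List (Int × Int) → List (Option Int)
  | [] => [none, none, none]
  | (p1, x0) :: rest =>
    match matchAInner xs0 xs1 p1 x0 (PySem.List.enumerate xs1) with
    | some r => r
    | none => matchAOuter xs0 xs1 rest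

def match_axis (scanner0 : List (Int × Int × Int)) (scanner1 : List (Int × Int × Int)) : List (Option Int) :=
  let xs0 := scanner0.map (fun p => p.1)
  let xs1 := scanner1.map (fun p => p.1)
  matchAOuter xs0 xs1 (PySem.List.enumerate xs0)

-- ===== PORT B =====
-- counts[a-b] += 1 over dict.fromkeys(xs0) × dict.fromkeys(xs1)
def matchBCounts (xs0 xs1 : List Int) : PySem.Dict Int Int :=
  (PySem.List.dedup xs0).foldl
    (fun d a =>
      (PySem.List.dedup xs1).foldl
        (fun d b => d.insert (a - b) (d.getD (a - b) 0 + 1)) d)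
    PySem.Dict.empty

-- 'for k in range(len(xs0)*n): p1, p2 = divmod(k, n); …'
-- (xs0[p1] / xs1[p2] are exact via pyGetD: on every scanned k the indices are in range)
def matchBScan (counts : PySem.Dict Int Int) (xs0 xs1 : List Int) (n : Int) : List Int → List (Option Int)
  | [] => [none, none, none]
  | k :: ks =>
    let p1 := PySem.Int.floordiv k n
    let p2 := PySem.Int.mod k n
    let dx := PySem.List.pyGetD xs0 p1 0 - PySem.List.pyGetD xs1 p2 0
    if counts.getD dx 0 > 11 then [some dx, some p1, some p2]
    else matchBScan counts xs0 xs1 n ks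

def match_axis_alt (scanner0 : List (Int × Int × Int)) (scanner1 : List (Int × Int × Int)) : List (Option Int) :=
  let xs0 := scanner0.map (fun p => p.1)
  let xs1 := scanner1.map (fun p => p.1)
  let counts := matchBCounts xs0 xs1
  let n : Int := xs1.length
  matchBScan counts xs0 xs1 n (PySem.List.pyRange 0 ((xs0.length : Int) * n) 1)

-- ===== PRECONDITION & SPEC =====
def Spec_match_axis (scanner0 : List (Int × Int × Int)) (scanner1 : List (Int × Int × Int)) (out : List (Option Int)) : Prop := out = match_axis_alt scanner0 scanner1
instance (scanner0 : List (Int × Int × Int)) (scanner1 : List (Int × Int × Int)) (out : List (Option Int)) : Decidable (Spec_match_axis scanner0 scanner1 out) := by unfold Spec_match_axis; infer_instance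

-- ===== CLAIM (what is proved, stated in full; the proofs are below) =====
def Claim_equal_match_axis : Prop := ∀ (scanner0 : List (Int × Int × Int)) (scanner1 : List (Int × Int × Int)), Dom_match_axis scanner0 scanner1 → Spec_match_axis scanner0 scanner1 (match_axis scanner0 scanner1)

-- ===== LEMMAS AND PROOFS =====

-- the inner counting fold adds, at key dx, the number of b's in l1 with a - b = dx
theorem matchB_inner_fold_getD (l1 : List Int) (a dx : Int) (d : PySem.Dict Int Int) :
    (l1.foldl (fun d b => d.insert (a - b) (d.getD (a - b) 0 + 1)) d).getD dx 0
      = d.getD dx 0 + (l1.countP (fun b => a - b == dx) : Int) := by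
  induction l1 generalizing d with
  | nil => simp
  | cons b l1 ih =>
    simp only [List.foldl_cons, ih, List.countP_cons]
    rw [PySem.Dict.getD_insert]
    by_cases h : dx = a - b
    · simp [h]
      ring
    · have h' : (a - b == dx) = false := by simp only [beq_eq_false_iff_ne]; omega
      simp [h, h']

-- the full counting fold: getD dx 0 = sum over a in l0 of |{b in l1 : a - b = dx}|
theorem matchB_outer_fold_getD (l0 l1 : List Int) (dx : Int) (d : PySem.Dict Int Int) :
    (l0.foldl (fun d a =>
        l1.foldl (fun d b => d.insert (a - b) (d.getD (a - b) 0 + 1)) d) d).getD dx 0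
      = d.getD dx 0 + ((l0.map (fun a => l1.countP (fun b => a - b == dx))).sum : Int) := by
  induction l0 generalizing d with
  | nil => simp
  | cons a l0 ih =>
    simp only [List.foldl_cons, ih, matchB_inner_fold_getD, List.map_cons, List.sum_cons]
    push_cast
    ring

theorem sum_map_addf (l : List Int) (f g : Int → Nat) :
    (l.map (fun x => f x + g x)).sum = (l.map f).sum + (l.map g).sum := by
  induction l with
  | nil => simp
  | cons x l ih => simp [ih]; omega

theorem sum_map_ite_eq_countP (l : List Int) (p : Int → Bool) :
    (l.map (fun b => if p b then 1 else 0)).sum = l.countP p := by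
  induction l with
  | nil => simp
  | cons b l ih =>
    by_cases h : p b
    · simp only [List.map_cons, List.sum_cons, List.countP_cons, h, ih]
      simp
      omega
    · simp only [List.map_cons, List.sum_cons, List.countP_cons, h, ih]
      simp

-- double-counting swap: summing match counts over l0 equals summing them over l1
theorem swap_countP (P : Int → Int → Bool) (l0 l1 : List Int) :
    (l0.map (fun a => l1.countP (fun b => P a b))).sum
      = (l1.map (fun b => l0.countP (fun a => P a b))).sum := by
  induction l1 generalizing l0 with
  | nil => simp
  | cons b l1 ih =>
    have step : (l0.map (fun a => (b :: l1).countP (fun b' => P a b'))).sum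
        = (l0.map (fun a => l1.countP (fun b' => P a b'))).sum
          + (l0.map (fun a => if P a b then 1 else 0)).sum := by
      rw [← sum_map_addf]
      apply congrArg List.sum
      apply List.map_congr_left
      intro a _
      rw [List.countP_cons]
    rw [step, ih, sum_map_ite_eq_countP]
    simp [Nat.add_comm]

-- counting matches of a nodup list against a single target is a membership test
theorem countP_eq_mem (l0 : List Int) (h : l0.Nodup) (c : Int) :
    l0.countP (fun a => a == c) = if c ∈ l0 then 1 else 0 := by
  have hc : l0.countP (fun a => a == c) = l0.count c := by
    simp [List.count, BEq.comm]
  rw [hc]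
  by_cases hm : c ∈ l0
  · simp [hm, List.count_eq_one_of_mem h hm]
  · simp [hm, List.count_eq_zero_of_not_mem hm]

-- set(xs.map f) for injective f is (dedup xs).map f
theorem ofList_map_add (f : Int → Int) (hf : ∀ a b, f a = f b → a = b) (xs : List Int) (s : List Int) :
    List.foldl PySem.Set.add (s.map f) (xs.map f) = (List.foldl PySem.Set.add s xs).map f := by
  induction xs generalizing s with
  | nil => simp
  | cons x xs ih =>
    simp only [List.map_cons, List.foldl_cons]
    have hmemf : (f x ∈ s.map f) ↔ (x ∈ s) := by
      constructor
      · intro hm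
        obtain ⟨a, ha, hfa⟩ := List.mem_map.mp hm
        exact (hf a x hfa) ▸ ha
      · intro hm; exact List.mem_map.mpr ⟨x, hm, rfl⟩
    have hadd : PySem.Set.add (s.map f) (f x) = (PySem.Set.add s x).map f := by
      simp only [PySem.Set.add, PySem.Set.contains, List.contains_eq_mem, hmemf]
      by_cases hx : x ∈ s <;> simp [hx]
    rw [hadd, ih]

theorem ofList_map (f : Int → Int) (hf : ∀ a b, f a = f b → a = b) (xs : List Int) :
    PySem.Set.ofList (xs.map f) = (PySem.List.dedup xs).map f := by
  have h := ofList_map_add f hf xs []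
  simpa [PySem.Set.ofList, PySem.Set.empty, PySem.List.dedup] using h

-- KEY: the precomputed table agrees with A's per-pair intersection size
theorem key_count (xs0 xs1 : List Int) (dx : Int) :
    (matchBCounts xs0 xs1).getD dx 0
      = PySem.Set.len (PySem.Set.inter (PySem.Set.ofList (xs1.map (fun x => x + dx))) xs0) := by
  rw [matchBCounts, matchB_outer_fold_getD, swap_countP]
  have hA : PySem.Set.len (PySem.Set.inter (PySem.Set.ofList (xs1.map (fun x => x + dx))) xs0)
      = ((PySem.List.dedup xs1).countP (fun b => PySem.Set.contains xs0 (b + dx)) : Int) := by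
    rw [ofList_map (fun x => x + dx) (by intro a b h; have h' : a + dx = b + dx := h; omega)]
    simp only [PySem.Set.inter, PySem.Set.len, List.filter_map, List.length_map]
    rw [List.countP_eq_length_filter]
    rfl
  rw [hA]
  have hB : ((PySem.List.dedup xs1).map (fun b => (PySem.List.dedup xs0).countP (fun a => a - b == dx))).sum
      = (PySem.List.dedup xs1).countP (fun b => PySem.Set.contains xs0 (b + dx)) := by
    rw [← sum_map_ite_eq_countP]
    apply congrArg List.sum
    apply List.map_congr_left
    intro b _
    have he : (fun a : Int => a - b == dx) = (fun a => a == dx + b) := by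
      funext a; rw [Bool.eq_iff_iff]; simp only [beq_iff_eq]; omega
    rw [he, countP_eq_mem _ (PySem.List.nodup_dedup xs0)]
    have hcond : (dx + b ∈ PySem.List.dedup xs0) = (PySem.Set.contains xs0 (b + dx) = true) := by
      rw [eq_iff_iff, PySem.List.mem_dedup, PySem.Set.contains_iff, Int.add_comm dx b]
    simp only [hcond]
  rw [hB]
  have hz : (PySem.Dict.empty : PySem.Dict Int Int).getD dx 0 = 0 := rfl
  rw [hz]
  ring

-- flat scan over one row (k in [i*n + j, i*n + n)) = A's inner loop from position j
theorem inner_scan (xs0 xs1 : List Int) (n : Int) (hn : n = (xs1.length : Int))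
    (i : Int) (x0 : Int) (hx0 : PySem.List.pyGetD xs0 i 0 = x0) :
    ∀ (t1 : List Int) (j : Nat), xs1.drop j = t1 → ∀ (ks : List Int),
    matchBScan (matchBCounts xs0 xs1) xs0 xs1 n
        (PySem.List.pyRange (i * n + (j : Int)) (i * n + n) 1 ++ ks)
      = match matchAInner xs0 xs1 i x0 (PySem.List.enumerate t1 (j : Int)) with
        | some r => r
        | none => matchBScan (matchBCounts xs0 xs1) xs0 xs1 n ks := by
  intro t1
  induction t1 with
  | nil =>
    intro j hdrop ks
    have hle : xs1.length ≤ j := List.drop_eq_nil_iff.mp hdrop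
    have hle' : (xs1.length : Int) ≤ (j : Int) := by exact_mod_cast hle
    rw [PySem.List.pyRange_one_eq_nil (by omega : i * n + n ≤ i * n + (j : Int))]
    simp [PySem.List.enumerate_nil, matchAInner]
  | cons x1 t1' ih =>
    intro j hdrop ks
    have hjlt : j < xs1.length := by
      by_contra h
      rw [List.drop_eq_nil_of_le (by omega)] at hdrop
      exact (List.cons_ne_nil _ _) hdrop.symm
    have hx1 : xs1[j]'hjlt = x1 := by
      have h0 : (xs1.drop j)[0]'(by rw [hdrop]; simp) = x1 := by simp [hdrop]
      rw [List.getElem_drop] at h0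
      simpa using h0
    have hdrop' : xs1.drop (j + 1) = t1' := by
      have h1 : xs1.drop (j + 1) = (xs1.drop j).drop 1 := by
        rw [List.drop_drop]
      rw [h1, hdrop, List.drop_one, List.tail_cons]
    have hjn : (j : Int) < n := by rw [hn]; exact_mod_cast hjlt
    have hj0 : (0 : Int) ≤ (j : Int) := Int.natCast_nonneg j
    have hn0 : (0 : Int) < n := by omega
    rw [PySem.List.pyRange_one_cons (by omega : i * n + (j : Int) < i * n + n), List.cons_append]
    have hfd : PySem.Int.floordiv (i * n + (j : Int)) n = i := by
      rw [PySem.Int.floordiv_eq_iff_of_pos hn0]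
      have he : (i + 1) * n = i * n + n := by ring
      rw [he]
      constructor <;> linarith
    have hmd : PySem.Int.mod (i * n + (j : Int)) n = (j : Int) := by
      have h := PySem.Int.floordiv_mul_add_mod (i * n + (j : Int)) n
      rw [hfd] at h
      linarith
    have hgd : xs1.getD j 0 = x1 := by
      rw [List.getD_eq_getElem?_getD, List.getElem?_eq_getElem hjlt, hx1, Option.getD_some]
    simp only [matchBScan, hfd, hmd, hx0, PySem.List.pyGetD_natCast, hgd]
    rw [PySem.List.enumerate_cons]
    simp only [matchAInner]
    rw [← key_count xs0 xs1 (x0 - x1)]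
    by_cases hc : (matchBCounts xs0 xs1).getD (x0 - x1) 0 > 11
    · simp [hc]
    · have hi := ih (j + 1) hdrop' ks
      push_cast at hi
      have he : i * n + ((j : Int) + 1) = i * n + (j : Int) + 1 := by ring
      rw [he] at hi
      simp only [hc, if_false]
      exact hi

-- flat scan over rows i.. = A's outer loop from row i
theorem outer_scan (xs0 xs1 : List Int) (n : Int) (hn : n = (xs1.length : Int)) :
    ∀ (t0 : List Int) (i : Nat), xs0.drop i = t0 →
    matchBScan (matchBCounts xs0 xs1) xs0 xs1 n
        (PySem.List.pyRange ((i : Int) * n) ((xs0.length : Int) * n) 1)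
      = matchAOuter xs0 xs1 (PySem.List.enumerate t0 i) := by
  intro t0
  induction t0 with
  | nil =>
    intro i hdrop
    have hle : xs0.length ≤ i := List.drop_eq_nil_iff.mp hdrop
    have hle' : (xs0.length : Int) ≤ (i : Int) := by exact_mod_cast hle
    have hn0 : (0 : Int) ≤ n := by rw [hn]; exact Int.natCast_nonneg _
    rw [PySem.List.pyRange_one_eq_nil (by nlinarith : (xs0.length : Int) * n ≤ (i : Int) * n)]
    simp [PySem.List.enumerate_nil, matchAOuter, matchBScan]
  | cons x0 t0' ih =>
    intro i hdrop
    have hilt : i < xs0.length := by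
      by_contra h
      rw [List.drop_eq_nil_of_le (by omega)] at hdrop
      exact (List.cons_ne_nil _ _) hdrop.symm
    have hx0e : xs0[i]'hilt = x0 := by
      have h0 : (xs0.drop i)[0]'(by rw [hdrop]; simp) = x0 := by simp [hdrop]
      rw [List.getElem_drop] at h0
      simpa using h0
    have hdrop' : xs0.drop (i + 1) = t0' := by
      have h1 : xs0.drop (i + 1) = (xs0.drop i).drop 1 := by
        rw [List.drop_drop]
      rw [h1, hdrop, List.drop_one, List.tail_cons]
    have hx0 : PySem.List.pyGetD xs0 (i : Int) 0 = x0 := by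
      rw [PySem.List.pyGetD_natCast, List.getD_eq_getElem?_getD, List.getElem?_eq_getElem hilt,
        hx0e, Option.getD_some]
    have hn0 : (0 : Int) ≤ n := by rw [hn]; exact Int.natCast_nonneg _
    have hi1 : ((i : Int) + 1) ≤ (xs0.length : Int) := by exact_mod_cast hilt
    have hsplit : ((i : Int) + 1) * n ≤ (xs0.length : Int) * n := by nlinarith
    rw [PySem.List.pyRange_one_append ((i : Int) * n) ((i : Int) * n + n) ((xs0.length : Int) * n)
      (by linarith) (by linarith [hsplit, show ((i : Int) + 1) * n = (i : Int) * n + n from by ring])]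
    have hinner := inner_scan xs0 xs1 n hn (i : Int) x0 hx0 xs1 0 (by simp)
      (PySem.List.pyRange ((i : Int) * n + n) ((xs0.length : Int) * n) 1)
    norm_num at hinner
    rw [hinner]
    rw [PySem.List.enumerate_cons]
    simp only [matchAOuter]
    cases hA : matchAInner xs0 xs1 (i : Int) x0 (PySem.List.enumerate xs1) with
    | some r => simp
    | none =>
      simp only []
      have hih := ih (i + 1) hdrop'
      push_cast at hih
      rw [show (i : Int) * n + n = ((i : Int) + 1) * n from by ring]
      exact hih

-- ===== VERDICT (by name: the statement is the Claim_ definition above) =====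
theorem match_axis_spec : Claim_equal_match_axis := by
  intro scanner0 scanner1 _
  unfold Spec_match_axis match_axis match_axis_alt
  have h := outer_scan (scanner0.map (fun p => p.1)) (scanner1.map (fun p => p.1)) _ rfl
    (scanner0.map (fun p => p.1)) 0 (by simp)
  simpa using h.symm
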